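-- pv_equiv track=rewrite | github.com/NathanMacDiarmid/SYSC4810 | Encrypt.py | checkForPhoneNumber
-- ===== SOURCE A (Python) =====
-- def checkForPhoneNumber(passwd) -> bool:
--     numberCount = 0
--     curr = 0
--     prev = 0
--     for elem in passwd:
--         if (elem.isnumeric()):
--             numberCount += 1
--         elif (passwd[curr].isnumeric() and passwd[prev].isnumeric() and numberCount > 0):
--             numberCount += 1
--         elif (numberCount != 9):
--             numberCount = 0
--         if (numberCount >= 9):
--             return False
--         curr += 1
--         prev = curr - 1
--     return True
-- ===== SOURCE B (Python) =====
-- def checkForPhoneNumber(passwd) -> bool: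
--     # Brute-force window scan: the password is rejected exactly when some
--     # 9-character window consists entirely of numeric characters.
--     return not any(
--         all(c.isnumeric() for c in passwd[i:i + 9])
--         for i in range(len(passwd) - 8)
--     )
-- ===== Notes on version B (the rewrite author's own statement) =====
-- stated objective: alternative
-- what changed: B abandons A's streaming run counter entirely and instead tests every 9-character window of the password for being all-numeric (a run of >=9 numerics exists iff some window of exactly 9 is all-numeric).
import Mathlib
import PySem

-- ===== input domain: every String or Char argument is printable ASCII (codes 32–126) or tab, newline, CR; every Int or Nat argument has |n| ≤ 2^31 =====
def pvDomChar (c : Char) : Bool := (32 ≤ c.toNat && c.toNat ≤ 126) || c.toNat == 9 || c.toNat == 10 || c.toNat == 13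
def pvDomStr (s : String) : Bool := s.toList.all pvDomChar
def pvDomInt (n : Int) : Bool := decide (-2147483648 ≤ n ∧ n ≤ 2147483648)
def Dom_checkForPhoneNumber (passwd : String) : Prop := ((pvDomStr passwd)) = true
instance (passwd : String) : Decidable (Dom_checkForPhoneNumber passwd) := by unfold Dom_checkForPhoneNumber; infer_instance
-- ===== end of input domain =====

-- B replaces A's streaming run counter with a brute-force check of every 9-character window; return values proved equal on all strings.

-- str.isnumeric() per character; exact on the printable-ASCII domain, where it is '0'..'9'.
def pvIsNum (c : Char) : Bool := c.isDigit

-- ===== PORT A =====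
def checkForPhoneNumber_go (s : List Char) (rest : List Char)
    (numberCount curr prev : Int) : Bool :=
  match rest with
  | [] => true
  | elem :: tl =>
    let nc :=
      if pvIsNum elem then numberCount + 1
      else if (((PySem.List.pyGet? s curr).map pvIsNum).getD false
               && ((PySem.List.pyGet? s prev).map pvIsNum).getD false
               && decide (numberCount > 0)) then numberCount + 1
      else if numberCount ≠ 9 then 0
      else numberCount
    if nc ≥ 9 then false
    else checkForPhoneNumber_go s tl nc (curr + 1) ((curr + 1) - 1)

def checkForPhoneNumber (passwd : String) : Bool :=
  checkForPhoneNumber_go passwd.toList passwd.toList 0 0 0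

-- ===== PORT B =====
def checkForPhoneNumber_alt (passwd : String) : Bool :=
  !((PySem.List.pyRange 0 ((passwd.toList.length : Int) - 8) 1).any
      (fun i => (PySem.List.slice passwd.toList (some i) (some (i + 9))).all pvIsNum))

-- ===== PRECONDITION & SPEC =====
def Spec_checkForPhoneNumber (passwd : String) (out : Bool) : Prop := out = checkForPhoneNumber_alt passwd
instance (passwd : String) (out : Bool) : Decidable (Spec_checkForPhoneNumber passwd out) := by unfold Spec_checkForPhoneNumber; infer_instance

-- ===== CLAIM (what is proved, stated in full; the proofs are below) =====
def Claim_equal_checkForPhoneNumber : Prop := ∀ (passwd : String), Dom_checkForPhoneNumber passwd → Spec_checkForPhoneNumber passwd (checkForPhoneNumber passwd)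

-- ===== LEMMAS AND PROOFS =====

-- characterisation of A's scan: run counter with early failure at 9
def gSpec : List Char → Int → Bool
  | [], _ => true
  | e :: tl, n =>
    let n' := if pvIsNum e then n + 1 else 0
    if n' ≥ 9 then false else gSpec tl n'

-- same scan with a Nat countdown 'r = 9 - n' of numerics still needed
def gSpecN : List Char → Nat → Bool
  | [], _ => true
  | c :: tl, r =>
    if pvIsNum c then (if r ≤ 1 then false else gSpecN tl (r - 1))
    else gSpecN tl 9

-- 'some 9-character window of l is all numeric'
def W (l : List Char) : Prop :=
  ∃ i : Nat, i + 9 ≤ l.length ∧ ((l.drop i).take 9).all pvIsNum = true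

lemma A_go_eq (s : List Char) : ∀ (rest : List Char) (k : Nat) (nc prev : Int),
    s.drop k = rest → 0 ≤ nc → nc < 9 →
    checkForPhoneNumber_go s rest nc (k : Int) prev = gSpec rest nc := by
  intro rest
  induction rest with
  | nil => intro k nc prev _ _ _; rfl
  | cons elem tl ih =>
    intro k nc prev hdrop h0 h9
    have hget : PySem.List.pyGet? s (k : Int) = some elem := by
      rw [PySem.List.pyGet?_natCast]
      have : s[k]? = (s.drop k).head? := by
        rw [List.head?_drop]
      rw [this, hdrop]; rfl
    by_cases hnum : pvIsNum elem
    · simp only [checkForPhoneNumber_go, gSpec, hnum, if_true]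
      by_cases hge : nc + 1 ≥ 9
      · simp [hge]
      · simp only [hge, if_false]
        have : ((k : Int) + 1) = ((k + 1 : Nat) : Int) := by push_cast; ring
        rw [this]
        exact ih (k + 1) (nc + 1) (((k + 1 : Nat) : Int) - 1)
          (by rw [← List.drop_drop, hdrop]; rfl) (by omega) (by omega)
    · have hdead : (((PySem.List.pyGet? s (k : Int)).map pvIsNum).getD false
               && ((PySem.List.pyGet? s prev).map pvIsNum).getD false
               && decide (nc > 0)) = false := by
        rw [hget]; simp [hnum]
      have hne : nc ≠ 9 := by omega
      simp only [checkForPhoneNumber_go, gSpec, hnum, hdead, Bool.false_eq_true,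
        if_false]
      have h09 : ¬ ((0 : Int) ≥ 9) := by omega
      rw [if_pos hne, if_neg h09, if_neg h09]
      have : ((k : Int) + 1) = ((k + 1 : Nat) : Int) := by push_cast; ring
      rw [this]
      exact ih (k + 1) 0 (((k + 1 : Nat) : Int) - 1)
        (by rw [← List.drop_drop, hdrop]; rfl) (by omega) (by omega)

lemma gSpec_eq_gSpecN : ∀ (l : List Char) (n : Int) (r : Nat),
    0 ≤ n → n < 9 → n + (r : Int) = 9 → gSpec l n = gSpecN l r := by
  intro l
  induction l with
  | nil => intro n r _ _ _; rfl
  | cons c tl ih =>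
    intro n r h0 h9 hr
    by_cases hc : pvIsNum c
    · simp only [gSpec, gSpecN, hc, if_true]
      by_cases hge : n + 1 ≥ 9
      · have : r ≤ 1 := by omega
        simp [hge, this]
      · have hr1 : ¬ r ≤ 1 := by omega
        simp only [hge, hr1, if_false]
        exact ih (n + 1) (r - 1) (by omega) (by omega) (by omega)
    · simp only [gSpec, gSpecN, hc, Bool.false_eq_true, if_false]
      rw [if_neg (by omega : ¬ ((0 : Int) ≥ 9))]
      exact ih 0 9 (by omega) (by omega) (by norm_num)

-- prefix-run monotonicity: a required prefix run shrinks
lemma PR_mono (l : List Char) (a b : Nat) (hab : a ≤ b)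
    (h : b ≤ l.length ∧ (l.take b).all pvIsNum = true) :
    a ≤ l.length ∧ (l.take a).all pvIsNum = true := by
  refine ⟨by omega, ?_⟩
  have : l.take a = (l.take b).take a := by rw [List.take_take, Nat.min_eq_left hab]
  rw [this]
  simp only [List.all_eq_true] at h ⊢
  intro x hx
  exact h.2 x (List.mem_of_mem_take hx)

lemma W_cons (c : Char) (tl : List Char) :
    W (c :: tl) ↔ (9 ≤ (c :: tl).length ∧ ((c :: tl).take 9).all pvIsNum = true) ∨ W tl := by
  constructor
  · rintro ⟨i, h1, h2⟩
    cases i with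
    | zero => left; exact ⟨by simpa using h1, by simpa using h2⟩
    | succ j => right; exact ⟨j, by simp at h1 ⊢; omega, by simpa using h2⟩
  · rintro (⟨h1, h2⟩ | ⟨j, h1, h2⟩)
    · exact ⟨0, by simpa using h1, by simpa using h2⟩
    · exact ⟨j + 1, by simp; omega, by simpa using h2⟩

-- the countdown scan fails exactly when a prefix run of r remains possible or some window exists
lemma gSpecN_false_iff : ∀ (l : List Char) (r : Nat), 1 ≤ r → r ≤ 9 →
    (gSpecN l r = false ↔ (r ≤ l.length ∧ (l.take r).all pvIsNum = true) ∨ W l) := by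
  intro l
  induction l with
  | nil =>
    intro r h1 _
    constructor
    · intro h; exact absurd h (by simp [gSpecN])
    · rintro (⟨h, _⟩ | ⟨i, hi, _⟩)
      · simp only [List.length_nil] at h; omega
      · simp only [List.length_nil] at hi; omega
  | cons c tl ih =>
    intro r h1 h9
    by_cases hc : pvIsNum c
    · by_cases hr1 : r ≤ 1
      · have hr : r = 1 := by omega
        subst hr
        simp only [gSpecN, hc, if_true, if_pos (le_refl 1)]
        exact iff_of_true trivial (Or.inl ⟨by simp, by simp [hc]⟩)
      · simp only [gSpecN, hc, if_true, if_neg hr1]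
        rw [ih (r - 1) (by omega) (by omega), W_cons]
        have hPR : (r ≤ (c :: tl).length ∧ ((c :: tl).take r).all pvIsNum = true) ↔
            (r - 1 ≤ tl.length ∧ (tl.take (r - 1)).all pvIsNum = true) := by
          have hr : r = (r - 1) + 1 := by omega
          rw [hr]
          simp only [List.take_succ_cons, List.all_cons, hc, Bool.true_and,
            List.length_cons, Nat.add_sub_cancel]
          constructor <;> rintro ⟨h, hx⟩ <;> exact ⟨by omega, hx⟩
        constructor
        · rintro (h | h)
          · left; exact hPR.mpr h
          · right; right; exact h
        · rintro (h | (⟨hl, ht⟩ | h))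
          · left; exact hPR.mp h
          · -- the full 9-window at the head gives a prefix run of r - 1 in tl
            left
            have h8 : 8 ≤ tl.length ∧ (tl.take 8).all pvIsNum = true := by
              constructor
              · simp at hl; omega
              · have : (c :: tl).take 9 = c :: tl.take 8 := by simp [List.take_succ_cons]
                rw [this] at ht
                simp only [List.all_cons, hc, Bool.true_and] at ht
                exact ht
            exact PR_mono tl (r - 1) 8 (by omega) h8
          · right; exact h
    · simp only [gSpecN, hc, Bool.false_eq_true, if_false]
      rw [ih 9 (by omega) (le_refl 9), W_cons]
      have hPRfalse : ¬ (r ≤ (c :: tl).length ∧ ((c :: tl).take r).all pvIsNum = true) := by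
        rintro ⟨_, hall⟩
        have hr : r = (r - 1) + 1 := by omega
        rw [hr, List.take_succ_cons] at hall
        simp [hc] at hall
      have hHead : ¬ (9 ≤ (c :: tl).length ∧ ((c :: tl).take 9).all pvIsNum = true) := by
        rintro ⟨_, hall⟩
        rw [List.take_succ_cons] at hall
        simp [hc] at hall
      constructor
      · rintro (⟨hl, ht⟩ | h)
        · right; right; exact ⟨0, by simpa using hl, by simpa using ht⟩
        · right; right; exact h
      · rintro (h | (h | h))
        · exact absurd h hPRfalse
        · exact absurd h hHead
        · right; exact h

-- B's window scan is exactly W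
lemma B_any_iff (l : List Char) :
    ((PySem.List.pyRange 0 ((l.length : Int) - 8) 1).any
      (fun i => (PySem.List.slice l (some i) (some (i + 9))).all pvIsNum)) = true ↔ W l := by
  rw [PySem.List.pyRange_one]
  simp only [List.any_map, List.any_eq_true, List.mem_range, Function.comp, zero_add]
  have hsl : ∀ k : Nat, PySem.List.slice l (some (k : Int)) (some ((k : Int) + 9)) =
      (l.drop k).take 9 := by
    intro k
    have h9 : ((k : Int) + 9) = ((k : Nat) : Int) + ((9 : Nat) : Int) := by norm_num
    rw [h9, PySem.List.slice_natCast_add]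
  constructor
  · rintro ⟨k, hk, hall⟩
    rw [hsl k] at hall
    exact ⟨k, by omega, hall⟩
  · rintro ⟨i, hi, hall⟩
    refine ⟨i, by omega, ?_⟩
    rw [hsl i]
    exact hall

-- ===== VERDICT (by name: the statement is the Claim_ definition above) =====
theorem checkForPhoneNumber_spec : Claim_equal_checkForPhoneNumber := by
  intro passwd _
  unfold Spec_checkForPhoneNumber checkForPhoneNumber checkForPhoneNumber_alt
  have hA := A_go_eq passwd.toList passwd.toList 0 0 0 rfl (by omega) (by omega)
  simp only [Nat.cast_zero] at hA
  rw [hA, gSpec_eq_gSpecN passwd.toList 0 9 (by omega) (by omega) (by norm_num)]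
  generalize passwd.toList = l
  have hiff := gSpecN_false_iff l 9 (by omega) (le_refl 9)
  have hW : (9 ≤ l.length ∧ (l.take 9).all pvIsNum = true) ∨ W l ↔ W l := by
    constructor
    · rintro (⟨h1, h2⟩ | h)
      · exact ⟨0, by simpa using h1, by simpa using h2⟩
      · exact h
    · intro h; right; exact h
  rw [hW] at hiff
  by_cases hw : W l
  · rw [hiff.mpr hw, (B_any_iff l).mpr hw]; rfl
  · have hB : ((PySem.List.pyRange 0 ((l.length : Int) - 8) 1).any
        (fun i => (PySem.List.slice l (some i) (some (i + 9))).all pvIsNum)) = false :=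
      Bool.eq_false_iff.mpr (fun h => hw ((B_any_iff l).mp h))
    have hg : gSpecN l 9 = true := by
      cases h : gSpecN l 9 with
      | false => exact absurd (hiff.mp h) hw
      | true => rfl
    rw [hg, hB]; rfl
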